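-- pv_equiv track=rewrite | github.com/pytatbro/weather-dashboard-kindle | app.py | get_wind_arrow
-- ===== SOURCE A (Python) =====
-- def get_wind_arrow(deg):
--     deg = deg % 360
--     dirs = [("↓",22.5),("↙",67.5),("←",112.5),("↖",157.5),
--             ("↑",202.5),("↗",247.5),("→",292.5),("↘",337.5),("↓",360)]
--     for arrow, bound in dirs:
--         if deg < bound:
--             return arrow
--     return "↓"
-- ===== SOURCE B (Python) =====
-- def get_wind_arrow(deg):
--     arrows = ["↓", "↙", "←", "↖", "↑", "↗", "→", "↘"]
--     return arrows[((deg % 360) * 2 + 45) // 90 % 8]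
-- ===== Notes on version B (the rewrite author's own statement) =====
-- stated objective: simpler
-- what changed: Replaces the linear scan over threshold bounds with a closed-form sector-index lookup (integer arithmetic, no loop or branch).
import Mathlib
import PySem

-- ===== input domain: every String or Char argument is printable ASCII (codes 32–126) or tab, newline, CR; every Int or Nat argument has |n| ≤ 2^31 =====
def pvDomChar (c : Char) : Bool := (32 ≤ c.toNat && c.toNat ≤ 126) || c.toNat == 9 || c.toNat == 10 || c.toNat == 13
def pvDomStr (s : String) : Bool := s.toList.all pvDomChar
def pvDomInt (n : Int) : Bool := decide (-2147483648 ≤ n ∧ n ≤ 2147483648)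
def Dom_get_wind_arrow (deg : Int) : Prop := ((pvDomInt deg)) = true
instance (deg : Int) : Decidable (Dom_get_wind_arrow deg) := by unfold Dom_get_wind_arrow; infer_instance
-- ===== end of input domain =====

-- B replaces A's threshold-scan loop with a closed-form sector-index lookup; objective: simpler.

-- ===== PORT A =====
-- A's bounds are halves of integers (22.5, 67.5, …); they are stored doubled (45, 135, …)
-- and compared against 2*deg, which is exact for the integer deg: deg < 22.5 ↔ 2*deg < 45.
def pyScanDirs (deg2 : Int) : List (String × Int) → String
  | [] => "↓"
  | (arrow, bound2) :: rest => if deg2 < bound2 then arrow else pyScanDirs deg2 rest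

def get_wind_arrow (deg : Int) : String :=
  let deg := PySem.Int.mod deg 360
  let dirs : List (String × Int) := [("↓", 45), ("↙", 135), ("←", 225), ("↖", 315),
      ("↑", 405), ("↗", 495), ("→", 585), ("↘", 675), ("↓", 720)]
  pyScanDirs (2 * deg) dirs

-- ===== PORT B =====
-- Source B's ((deg % 360) * 2 + 45) // 90 % 8 indexing into the 8-arrow list.
def get_wind_arrow_alt (deg : Int) : String :=
  let arrows : List String := ["↓", "↙", "←", "↖", "↑", "↗", "→", "↘"]
  (PySem.List.pyGet? arrows (PySem.Int.mod (PySem.Int.floordiv ((PySem.Int.mod deg 360) * 2 + 45) 90) 8)).getD ""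

-- ===== PRECONDITION & SPEC =====
def Spec_get_wind_arrow (deg : Int) (out : String) : Prop := out = get_wind_arrow_alt deg
instance (deg : Int) (out : String) : Decidable (Spec_get_wind_arrow deg out) := by unfold Spec_get_wind_arrow; infer_instance

-- ===== CLAIM (what is proved, stated in full; the proofs are below) =====
def Claim_equal_get_wind_arrow : Prop := ∀ (deg : Int), Dom_get_wind_arrow deg → Spec_get_wind_arrow deg (get_wind_arrow deg)

-- ===== LEMMAS AND PROOFS =====

-- both ports agree on every residue 0 ≤ r < 360
set_option maxRecDepth 4000 in
set_option maxHeartbeats 1000000 in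
theorem pv_allcases : ∀ n : Fin 360,
    get_wind_arrow ((n : Nat) : Int) = get_wind_arrow_alt ((n : Nat) : Int) := by decide

theorem get_wind_arrow_eq_mod (deg : Int) :
    get_wind_arrow deg = get_wind_arrow (deg % 360) := by
  simp [get_wind_arrow, Int.emod_emod_of_dvd deg (dvd_refl 360)]

theorem get_wind_arrow_alt_eq_mod (deg : Int) :
    get_wind_arrow_alt deg = get_wind_arrow_alt (deg % 360) := by
  simp [get_wind_arrow_alt, Int.emod_emod_of_dvd deg (dvd_refl 360)]

-- ===== VERDICT (by name: the statement is the Claim_ definition above) =====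
theorem get_wind_arrow_spec : Claim_equal_get_wind_arrow := by
  intro deg _
  unfold Spec_get_wind_arrow
  rw [get_wind_arrow_eq_mod, get_wind_arrow_alt_eq_mod]
  have h0 : 0 ≤ deg % 360 := Int.emod_nonneg deg (by norm_num)
  have h1 : deg % 360 < 360 := Int.emod_lt_of_pos deg (by norm_num)
  have hn : ((deg % 360).toNat : Int) = deg % 360 := Int.toNat_of_nonneg h0
  have hlt : (deg % 360).toNat < 360 := by omega
  have := pv_allcases ⟨(deg % 360).toNat, hlt⟩
  simpa [hn] using this
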